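-- pv_equiv track=rewrite | github.com/GALJO/pythonBasics | olympiad_exercises/okiXV/stage1/open_tour/psi.py | find_first_series_start
-- ===== SOURCE A (Python) =====
-- def find_first_series_start(_tab, _second_start_index):
--     _res = 0
--     _sum = 0
--     _isFirstEven = _tab[0] % 2 == 0
--     if not _isFirstEven:
--         _second_start_index = 1
--     for i in range(0, len(_tab)):
--         _sum += _tab[i]
--         if _sum % 2 == 0:
--             _res += 1
--         if _second_start_index == -1 and _isFirstEven and _tab[i] % 2 == 1:
--             _second_start_index = i + 1
--     return _res, _second_start_index
-- ===== SOURCE B (Python) =====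
-- def find_first_series_start(_tab, _second_start_index):
--     first = _tab[0]
--     # pass 1: count even prefix sums tracking only the running parity
--     parity = 0
--     res = 0
--     for v in _tab:
--         parity = (parity + v % 2) % 2
--         res += 1 - parity
--     # the index, computed independently of the counting pass
--     if first % 2 == 1:
--         idx = 1
--     elif _second_start_index == -1:
--         idx = next((i + 1 for i, v in enumerate(_tab) if v % 2 == 1), -1)
--     else:
--         idx = _second_start_index
--     return res, idx
-- ===== Notes on version B (the rewrite author's own statement) =====
-- stated objective: alternative
-- what changed: Single fused loop over a (res,sum,index) state is split into a parity-only counting pass (no running sum, no indexing) plus an independent first-odd search with next/enumerate that stops at the first hit.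
import Mathlib
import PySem

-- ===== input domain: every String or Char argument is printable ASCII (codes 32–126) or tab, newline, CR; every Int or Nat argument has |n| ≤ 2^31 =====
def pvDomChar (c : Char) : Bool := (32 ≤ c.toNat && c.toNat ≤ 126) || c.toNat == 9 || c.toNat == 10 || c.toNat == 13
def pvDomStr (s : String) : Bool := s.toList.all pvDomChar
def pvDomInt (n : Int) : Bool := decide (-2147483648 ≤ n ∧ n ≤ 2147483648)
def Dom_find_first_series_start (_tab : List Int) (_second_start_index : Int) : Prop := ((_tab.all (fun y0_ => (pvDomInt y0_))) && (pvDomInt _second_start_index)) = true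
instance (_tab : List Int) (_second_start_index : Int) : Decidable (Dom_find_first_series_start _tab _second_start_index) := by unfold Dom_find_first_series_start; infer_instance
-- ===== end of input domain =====

-- B replaces A's single fused loop (res, running sum, sentinel index) by a parity-only counting
-- pass plus an independent early-stopping first-odd search; same cost class (alternative).

-- ===== PORT A =====
-- literal transliteration of A: one loop over range(0, len(_tab)) with state ((res, sum), ssi)
def find_first_series_start (_tab : List Int) (_second_start_index : Int) : Int × Int :=
  match PySem.List.pyGet? _tab 0 with
  | none => (0, _second_start_index)  -- IndexError in Python; excluded by Pre_
  | some t0 =>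
    let isFirstEven : Bool := PySem.Int.mod t0 2 == 0
    let ssi0 : Int := if !isFirstEven then 1 else _second_start_index
    let st := (PySem.List.pyRange 0 (PySem.List.len _tab) 1).foldl
      (fun (st : (Int × Int) × Int) i =>
        let ti := PySem.List.pyGetD _tab i 0
        let sum := st.1.2 + ti
        ((if PySem.Int.mod sum 2 == 0 then st.1.1 + 1 else st.1.1, sum),
         if st.2 == -1 && isFirstEven && (PySem.Int.mod ti 2 == 1) then i + 1 else st.2))
      ((0, 0), ssi0)
    (st.1.1, st.2)

-- ===== PORT B =====
-- literal transliteration of Source B: parity/res fold over the elements, then the index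
def find_first_series_start_alt (_tab : List Int) (_second_start_index : Int) : Int × Int :=
  match PySem.List.pyGet? _tab 0 with
  | none => (0, _second_start_index)  -- IndexError in Python; excluded by Pre_
  | some first =>
    let pr := _tab.foldl (fun (st : Int × Int) v =>
        let parity := PySem.Int.mod (st.1 + PySem.Int.mod v 2) 2
        (parity, st.2 + (1 - parity))) (0, 0)
    let idx : Int :=
      if PySem.Int.mod first 2 == 1 then 1
      else if _second_start_index == -1 then
        match (PySem.List.enumerate _tab 0).find? (fun p => PySem.Int.mod p.2 2 == 1) with
        | some p => p.1 + 1
        | none => -1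
      else _second_start_index
    (pr.2, idx)

-- ===== PRECONDITION & SPEC =====
-- Pre_ excludes only the empty list, on which A raises IndexError (_tab[0]).
def Pre_find_first_series_start (_tab : List Int) (_second_start_index : Int) : Prop := _tab ≠ []
instance (_tab : List Int) (_second_start_index : Int) : Decidable (Pre_find_first_series_start _tab _second_start_index) := by unfold Pre_find_first_series_start; infer_instance
def pvWitness_find_first_series_start : List Int × Int := ([2, 3, 4], -1)

def Spec_find_first_series_start (_tab : List Int) (_second_start_index : Int) (out : Int × Int) : Prop := out = find_first_series_start_alt _tab _second_start_index
instance (_tab : List Int) (_second_start_index : Int) (out : Int × Int) : Decidable (Spec_find_first_series_start _tab _second_start_index out) := by unfold Spec_find_first_series_start; infer_instance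

-- ===== CLAIM (what is proved, stated in full; the proofs are below) =====
def Claim_equal_find_first_series_start : Prop := ∀ (_tab : List Int) (_second_start_index : Int), Dom_find_first_series_start _tab _second_start_index → Pre_find_first_series_start _tab _second_start_index → Spec_find_first_series_start _tab _second_start_index (find_first_series_start _tab _second_start_index)

-- ===== LEMMAS AND PROOFS =====

-- the (res, sum) component of A's fold equals B's (parity, res) fold, under parity = sum % 2
lemma res_fold_eq (l : List Int) : ∀ (res sum : Int),
    (l.foldl (fun (rs : Int × Int) v =>
        (if PySem.Int.mod (rs.2 + v) 2 == 0 then rs.1 + 1 else rs.1, rs.2 + v)) (res, sum)).1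
    = (l.foldl (fun (st : Int × Int) v =>
        (PySem.Int.mod (st.1 + PySem.Int.mod v 2) 2,
         st.2 + (1 - PySem.Int.mod (st.1 + PySem.Int.mod v 2) 2))) (PySem.Int.mod sum 2, res)).2 := by
  induction l with
  | nil => intro res sum; rfl
  | cons v l ih =>
    intro res sum
    simp only [List.foldl_cons]
    have hmod : PySem.Int.mod (PySem.Int.mod sum 2 + PySem.Int.mod v 2) 2
        = PySem.Int.mod (sum + v) 2 := by
      simp only [PySem.Int.mod_eq_emod_of_pos (by omega : (0:Int) < 2)]; omega
    have hres : res + (1 - PySem.Int.mod (sum + v) 2)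
        = (if PySem.Int.mod (sum + v) 2 == 0 then res + 1 else res) := by
      have h0 : 0 ≤ PySem.Int.mod (sum + v) 2 := PySem.Int.mod_nonneg _ (by omega)
      have h1 : PySem.Int.mod (sum + v) 2 < 2 := PySem.Int.mod_lt _ (by omega)
      rcases (by omega : PySem.Int.mod (sum + v) 2 = 0 ∨ PySem.Int.mod (sum + v) 2 = 1) with h | h <;>
        rw [h] <;> norm_num
    rw [ih, hmod, hres]

-- a fold whose body never changes the accumulator
lemma foldl_id {α β : Type} (l : List α) (init : β) :
    l.foldl (fun a _ => a) init = init := by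
  induction l generalizing init with
  | nil => rfl
  | cons x l ih => exact ih init

-- the sentinel update keeps any non-(-1) value unchanged
lemma ssi_fold_stay (l : List (Int × Int)) : ∀ (ssi : Int), ssi ≠ -1 →
    l.foldl (fun (a : Int) (p : Int × Int) =>
      if a == -1 && true && (PySem.Int.mod p.2 2 == 1) then p.1 + 1 else a) ssi = ssi := by
  induction l with
  | nil => intro ssi _; rfl
  | cons p l ih =>
    intro ssi h
    simp only [List.foldl_cons]
    rw [if_neg (by simp [h]), ih ssi h]

-- starting from -1, the sentinel fold computes the first-odd search
lemma ssi_fold_find (l : List Int) : ∀ (s : Int), 0 ≤ s →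
    (PySem.List.enumerate l s).foldl (fun (a : Int) (p : Int × Int) =>
      if a == -1 && true && (PySem.Int.mod p.2 2 == 1) then p.1 + 1 else a) (-1)
    = (match (PySem.List.enumerate l s).find? (fun p => PySem.Int.mod p.2 2 == 1) with
       | some p => p.1 + 1
       | none => -1) := by
  induction l with
  | nil => intro s _; rfl
  | cons v l ih =>
    intro s hs
    rw [PySem.List.enumerate_cons, List.foldl_cons]
    by_cases hv : (PySem.Int.mod v 2 == 1) = true
    · have hfind : List.find? (fun p : Int × Int => PySem.Int.mod p.2 2 == 1)
          ((s, v) :: PySem.List.enumerate l (s + 1)) = some (s, v) := List.find?_cons_of_pos hv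
      rw [hfind, if_pos (show ((-1:Int) == -1 && true && (PySem.Int.mod ((s, v) : Int × Int).2 2 == 1)) = true from hv)]
      exact ssi_fold_stay _ (s + 1) (by omega)
    · have hv' : (PySem.Int.mod v 2 == 1) = false := Bool.eq_false_iff.mpr hv
      have hfind : List.find? (fun p : Int × Int => PySem.Int.mod p.2 2 == 1)
          ((s, v) :: PySem.List.enumerate l (s + 1))
          = List.find? (fun p : Int × Int => PySem.Int.mod p.2 2 == 1) (PySem.List.enumerate l (s + 1)) :=
        List.find?_cons_of_neg hv
      rw [hfind, if_neg (show ¬ ((-1:Int) == -1 && true && (PySem.Int.mod ((s, v) : Int × Int).2 2 == 1)) = true from hv)]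
      exact ih (s + 1) (by omega)

-- ===== VERDICT (by name: the statement is the Claim_ definition above) =====
theorem find_first_series_start_spec : Claim_equal_find_first_series_start := by
  intro tab s _ hpre
  unfold Spec_find_first_series_start
  cases tab with
  | nil => exact absurd rfl hpre
  | cons t0 rest =>
    simp only [find_first_series_start, find_first_series_start_alt, PySem.List.pyGet?_zero_cons]
    -- A's index loop is a fold over enumerate
    have hA : ∀ (init : (Int × Int) × Int),
        (PySem.List.pyRange 0 (PySem.List.len (t0 :: rest)) 1).foldl
          (fun (st : (Int × Int) × Int) (i : Int) =>
            ((if PySem.Int.mod (st.1.2 + PySem.List.pyGetD (t0 :: rest) i 0) 2 == 0 then st.1.1 + 1 else st.1.1,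
              st.1.2 + PySem.List.pyGetD (t0 :: rest) i 0),
             if st.2 == -1 && (PySem.Int.mod t0 2 == 0) && (PySem.Int.mod (PySem.List.pyGetD (t0 :: rest) i 0) 2 == 1)
             then i + 1 else st.2)) init
        = (PySem.List.enumerate (t0 :: rest) 0).foldl
          (fun (st : (Int × Int) × Int) (p : Int × Int) =>
            ((if PySem.Int.mod (st.1.2 + p.2) 2 == 0 then st.1.1 + 1 else st.1.1, st.1.2 + p.2),
             if st.2 == -1 && (PySem.Int.mod t0 2 == 0) && (PySem.Int.mod p.2 2 == 1) then p.1 + 1 else st.2)) init := by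
      intro init
      rw [PySem.List.enumerate_eq_map_pyRange (d := (0:Int)), List.foldl_map]
    -- the paired fold splits into the (res,sum) fold and the sentinel fold
    have hsplit : ∀ (init : (Int × Int) × Int),
        (PySem.List.enumerate (t0 :: rest) 0).foldl
          (fun (st : (Int × Int) × Int) (p : Int × Int) =>
            ((if PySem.Int.mod (st.1.2 + p.2) 2 == 0 then st.1.1 + 1 else st.1.1, st.1.2 + p.2),
             if st.2 == -1 && (PySem.Int.mod t0 2 == 0) && (PySem.Int.mod p.2 2 == 1) then p.1 + 1 else st.2)) init
        = ((PySem.List.enumerate (t0 :: rest) 0).foldl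
             (fun (rs : Int × Int) (p : Int × Int) =>
               (if PySem.Int.mod (rs.2 + p.2) 2 == 0 then rs.1 + 1 else rs.1, rs.2 + p.2)) init.1,
           (PySem.List.enumerate (t0 :: rest) 0).foldl
             (fun (a : Int) (p : Int × Int) =>
               if a == -1 && (PySem.Int.mod t0 2 == 0) && (PySem.Int.mod p.2 2 == 1) then p.1 + 1 else a) init.2) := by
      intro init
      rw [← PySem.List.foldl_prod_mk
            (f := fun (rs : Int × Int) (p : Int × Int) =>
               (if PySem.Int.mod (rs.2 + p.2) 2 == 0 then rs.1 + 1 else rs.1, rs.2 + p.2))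
            (g := fun (a : Int) (p : Int × Int) =>
               if a == -1 && (PySem.Int.mod t0 2 == 0) && (PySem.Int.mod p.2 2 == 1) then p.1 + 1 else a)]
    -- the (res,sum) fold over enumerate is the same fold over the elements
    have helem : ∀ (init : Int × Int),
        (PySem.List.enumerate (t0 :: rest) 0).foldl
          (fun (rs : Int × Int) (p : Int × Int) =>
            (if PySem.Int.mod (rs.2 + p.2) 2 == 0 then rs.1 + 1 else rs.1, rs.2 + p.2)) init
        = (t0 :: rest).foldl
          (fun (rs : Int × Int) v =>
            (if PySem.Int.mod (rs.2 + v) 2 == 0 then rs.1 + 1 else rs.1, rs.2 + v)) init := by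
      intro init
      conv_rhs => rw [← PySem.List.map_snd_enumerate (t0 :: rest) 0]
      rw [List.foldl_map]
    rw [hA, hsplit, helem]
    have hres : ((t0 :: rest).foldl
          (fun (rs : Int × Int) v =>
            (if PySem.Int.mod (rs.2 + v) 2 == 0 then rs.1 + 1 else rs.1, rs.2 + v)) (0, 0)).1
        = ((t0 :: rest).foldl (fun (st : Int × Int) v =>
            (PySem.Int.mod (st.1 + PySem.Int.mod v 2) 2,
             st.2 + (1 - PySem.Int.mod (st.1 + PySem.Int.mod v 2) 2))) (0, 0)).2 := by
      have h := res_fold_eq (t0 :: rest) 0 0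
      rwa [show PySem.Int.mod 0 2 = 0 by decide] at h
    have hb0 : 0 ≤ PySem.Int.mod t0 2 := PySem.Int.mod_nonneg _ (by omega)
    have hb1 : PySem.Int.mod t0 2 < 2 := PySem.Int.mod_lt _ (by omega)
    by_cases hfe : (PySem.Int.mod t0 2 == 0) = true
    · -- first element even
      have hfe' : PySem.Int.mod t0 2 = 0 := by simpa using hfe
      have hfo : (PySem.Int.mod t0 2 == 1) = false := by
        rw [beq_eq_false_iff_ne]; omega
      simp only [hfe, hfo, Bool.not_true, Bool.false_eq_true, if_false]
      by_cases hs : (s == -1) = true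
      · have hs' : s = -1 := by simpa using hs
        subst hs'
        simp only [hs, if_true, Prod.mk.injEq]
        exact ⟨hres, ssi_fold_find (t0 :: rest) 0 (by omega)⟩
      · have hs' : s ≠ -1 := by simpa using hs
        simp only [hs, Bool.false_eq_true, if_false, Prod.mk.injEq]
        exact ⟨hres, ssi_fold_stay _ s hs'⟩
    · -- first element odd
      have hfe' : ¬ PySem.Int.mod t0 2 = 0 := by simpa using hfe
      have hfo : (PySem.Int.mod t0 2 == 1) = true := by
        rw [beq_iff_eq]; omega
      simp only [hfe, hfo, Bool.not_false, if_true, Prod.mk.injEq]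
      refine ⟨hres, ?_⟩
      rw [show (fun (a : Int) (p : Int × Int) =>
             if a == -1 && false && (PySem.Int.mod p.2 2 == 1) then p.1 + 1 else a)
           = (fun (a : Int) (_ : Int × Int) => a) from by funext a p; simp]
      exact foldl_id _ 1
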